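-- pv_equiv track=rewrite | github.com/zack-zzq/FTBQuestLocalizerPython | src/ftb_quest_localizer/splitter.py | _categorize_entries
-- ===== SOURCE A (Python) =====
-- from collections import OrderedDict
--
-- def _categorize_entries(
--     lang_data: OrderedDict,
-- ) -> dict[str, OrderedDict]:
--     """Categorize flattened lang entries by their prefix type.
--
--     Returns a dict with keys: 'chapter', 'chapter_group', 'quest', 'task',
--     'reward', 'reward_table', 'file', 'other'.
--     """
--     categories: dict[str, OrderedDict] = {
--         "chapter": OrderedDict(),
--         "chapter_group": OrderedDict(),
--         "quest": OrderedDict(),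
--         "task": OrderedDict(),
--         "reward": OrderedDict(),
--         "reward_table": OrderedDict(),
--         "file": OrderedDict(),
--         "other": OrderedDict(),
--     }
--
--     prefix_map = {
--         "chapter_group.": "chapter_group",
--         "chapter.": "chapter",
--         "quest.": "quest",
--         "task.": "task",
--         "reward_table.": "reward_table",
--         "reward.": "reward",
--         "file.": "file",
--     }
--
--     for key, value in lang_data.items():
--         assigned = False
--         # Check longer prefixes first to avoid "chapter." matching "chapter_group."
--         for prefix in sorted(prefix_map.keys(), key=len, reverse=True):
--             if key.startswith(prefix):
--                 categories[prefix_map[prefix]][key] = value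
--                 assigned = True
--                 break
--         if not assigned:
--             categories["other"][key] = value
--
--     return categories
-- ===== SOURCE B (Python) =====
-- from collections import OrderedDict
--
-- _KNOWN_PREFIXES = {
--     "chapter", "chapter_group", "quest", "task",
--     "reward", "reward_table", "file",
-- }
--
--
-- def _categorize_entries(
--     lang_data: OrderedDict,
-- ) -> dict[str, OrderedDict]:
--     """Categorize flattened lang entries by their prefix type.
--
--     Splits each key once on '.' and looks the first segment up in a set,
--     instead of scanning a sorted list of dotted prefixes per key.
--     """
--     categories: dict[str, OrderedDict] = {
--         "chapter": OrderedDict(),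
--         "chapter_group": OrderedDict(),
--         "quest": OrderedDict(),
--         "task": OrderedDict(),
--         "reward": OrderedDict(),
--         "reward_table": OrderedDict(),
--         "file": OrderedDict(),
--         "other": OrderedDict(),
--     }
--     for key, value in lang_data.items():
--         parts = key.split(".", 1)
--         cat = parts[0] if len(parts) == 2 and parts[0] in _KNOWN_PREFIXES else "other"
--         categories[cat][key] = value
--     return categories
-- ===== Notes on version B (the rewrite author's own statement) =====
-- stated objective: simpler
-- what changed: Replaces the per-key scan over a length-sorted list of dotted prefixes (re-sorted on every iteration) with a single split of the key on its first '.' and one set-membership lookup of the first segment.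
import Mathlib
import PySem

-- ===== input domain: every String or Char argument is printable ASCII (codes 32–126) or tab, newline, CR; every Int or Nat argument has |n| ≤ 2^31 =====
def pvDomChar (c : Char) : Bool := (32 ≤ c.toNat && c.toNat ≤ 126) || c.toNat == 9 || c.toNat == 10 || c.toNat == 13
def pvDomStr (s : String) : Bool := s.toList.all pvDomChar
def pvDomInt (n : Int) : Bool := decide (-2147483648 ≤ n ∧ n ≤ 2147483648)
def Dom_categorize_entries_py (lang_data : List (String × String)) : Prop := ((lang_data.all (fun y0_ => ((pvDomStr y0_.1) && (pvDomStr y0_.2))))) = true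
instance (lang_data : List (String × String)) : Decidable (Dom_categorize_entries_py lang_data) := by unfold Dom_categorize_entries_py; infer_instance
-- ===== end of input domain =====

-- B replaces A's per-key scan over a length-sorted list of dotted prefixes with one
-- split of the key on its first '.' and a set lookup of the first segment (objective: simpler).
-- Both programs only read lang_data; the return value (dict of dicts, insertion order) is what is compared.

-- ===== PORT A =====
def pvPrefixMapA : PySem.Dict String String :=
  PySem.Dict.ofList [("chapter_group.", "chapter_group"), ("chapter.", "chapter"),
    ("quest.", "quest"), ("task.", "task"), ("reward_table.", "reward_table"),
    ("reward.", "reward"), ("file.", "file")]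

-- A's inner 'for prefix in sorted(...): if key.startswith(prefix): …; break' loop with its
-- 'assigned' flag; 'categories[cat][key] = value' mutates the inner dict in place = Dict.modify
-- (the category key is always present, so the default is never used).
def pvAssignA (key value : String) (cats : PySem.Dict String (PySem.Dict String String)) :
    List String → PySem.Dict String (PySem.Dict String String)
  | [] => cats.modify "other" PySem.Dict.empty (fun inner => inner.insert key value)
  | p :: rest =>
      if PySem.Str.startswith key p then
        cats.modify (pvPrefixMapA.getD p "") PySem.Dict.empty (fun inner => inner.insert key value)
      else pvAssignA key value cats rest

def categorize_entries_py (lang_data : List (String × String)) : List (String × List (String × String)) :=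
  let categories : PySem.Dict String (PySem.Dict String String) :=
    PySem.Dict.ofList [("chapter", PySem.Dict.empty), ("chapter_group", PySem.Dict.empty),
      ("quest", PySem.Dict.empty), ("task", PySem.Dict.empty), ("reward", PySem.Dict.empty),
      ("reward_table", PySem.Dict.empty), ("file", PySem.Dict.empty), ("other", PySem.Dict.empty)]
  let final := lang_data.foldl (fun cats kv =>
      pvAssignA kv.1 kv.2 cats
        (PySem.List.sorted pvPrefixMapA.keys (fun p => PySem.Str.len p) true)) categories
  final.items.map (fun c => (c.1, c.2.items))

-- ===== PORT B =====
def pvKnownPrefixesB : PySem.Set String :=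
  PySem.Set.ofList ["chapter", "chapter_group", "quest", "task", "reward", "reward_table", "file"]

-- parts = key.split('.', 1); cat = parts[0] if len(parts) == 2 and parts[0] in set else 'other'
def pvCatB (key : String) : String :=
  match PySem.Str.splitMax? key "." 1 with
  | some [p0, _] => if pvKnownPrefixesB.contains p0 then p0 else "other"
  | _ => "other"

def categorize_entries_py_alt (lang_data : List (String × String)) : List (String × List (String × String)) :=
  let categories : PySem.Dict String (PySem.Dict String String) :=
    PySem.Dict.ofList [("chapter", PySem.Dict.empty), ("chapter_group", PySem.Dict.empty),
      ("quest", PySem.Dict.empty), ("task", PySem.Dict.empty), ("reward", PySem.Dict.empty),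
      ("reward_table", PySem.Dict.empty), ("file", PySem.Dict.empty), ("other", PySem.Dict.empty)]
  let final := lang_data.foldl (fun cats kv =>
      cats.modify (pvCatB kv.1) PySem.Dict.empty (fun inner => inner.insert kv.1 kv.2)) categories
  final.items.map (fun c => (c.1, c.2.items))

-- ===== PRECONDITION & SPEC =====
def Spec_categorize_entries_py (lang_data : List (String × String)) (out : List (String × List (String × String))) : Prop := out = categorize_entries_py_alt lang_data
instance (lang_data : List (String × String)) (out : List (String × List (String × String))) : Decidable (Spec_categorize_entries_py lang_data out) := by unfold Spec_categorize_entries_py; infer_instance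

-- ===== CLAIM (what is proved, stated in full; the proofs are below) =====
def Claim_equal_categorize_entries_py : Prop := ∀ (lang_data : List (String × String)), Dom_categorize_entries_py lang_data → Spec_categorize_entries_py lang_data (categorize_entries_py lang_data)

-- ===== LEMMAS AND PROOFS =====

theorem pvGo0 (l : List Char) (acc : List (List Char)) (fuel : Nat) (h : 0 < fuel) :
    PySem.Chars.splitOnMax.go ['.'] fuel 0 l [] acc = acc.reverse ++ [l] := by
  match fuel, h with
  | fuel+1, _ =>
    cases l <;> simp [PySem.Chars.splitOnMax.go]

theorem pvGo1 (l : List Char) (cur : List Char) (acc : List (List Char)) (fuel : Nat)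
    (h : l.length < fuel) :
    PySem.Chars.splitOnMax.go ['.'] fuel 1 l cur acc =
      if '.' ∈ l then
        acc.reverse ++ [cur.reverse ++ l.takeWhile (fun c => !(c == '.')),
          (l.dropWhile (fun c => !(c == '.'))).tail]
      else acc.reverse ++ [cur.reverse ++ l] := by
  induction l generalizing cur acc fuel with
  | nil =>
    match fuel, h with
    | fuel+1, _ => simp [PySem.Chars.splitOnMax.go]
  | cons c rest ih =>
    match fuel, h with
    | fuel+1, h =>
      have hf : rest.length < fuel := by simpa using h
      by_cases hc : c = '.'
      · subst hc
        simp only [PySem.Chars.splitOnMax.go]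
        rw [if_neg (by omega), if_pos (by simp)]
        simp only [show (1-1:Nat) = 0 from rfl, List.length_singleton, List.drop_succ_cons,
          List.drop_zero]
        rw [pvGo0 rest (cur.reverse :: acc) fuel (by omega)]
        simp [List.takeWhile, List.dropWhile]
      · simp only [PySem.Chars.splitOnMax.go]
        rw [if_neg (by omega)]
        have hpre : List.isPrefixOf ['.'] (c :: rest) = false := by
          simp [List.isPrefixOf, Ne.symm hc]
        rw [hpre]
        simp only [Bool.false_eq_true, if_false]
        rw [ih (c :: cur) acc fuel hf]
        have hm : ('.' ∈ c :: rest) ↔ ('.' ∈ rest) := by simp [Ne.symm hc]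
        have htw : List.takeWhile (fun c => !(c == '.')) (c :: rest)
            = c :: List.takeWhile (fun c => !(c == '.')) rest := by
          have hb : (c == '.') = false := beq_eq_false_iff_ne.mpr hc
          simp [hb]
        have hdw : List.dropWhile (fun c => !(c == '.')) (c :: rest)
            = List.dropWhile (fun c => !(c == '.')) rest := by
          have hb : (c == '.') = false := beq_eq_false_iff_ne.mpr hc
          simp [hb]
        rw [htw, hdw]
        by_cases hd : '.' ∈ rest <;> simp [hd, hm]

theorem pvSplit (key : List Char) :
    PySem.Chars.splitOnMax key ['.'] 1 =
      if '.' ∈ key then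
        [key.takeWhile (fun c => !(c == '.')), (key.dropWhile (fun c => !(c == '.'))).tail]
      else [key] := by
  unfold PySem.Chars.splitOnMax
  rw [if_neg (by omega)]
  rw [show ((1:Int).toNat) = 1 from rfl]
  rw [pvGo1 key [] [] (key.length + 1) (by omega)]
  by_cases hd : '.' ∈ key <;> simp [hd]

theorem pvTW (t r : List Char) (ht : '.' ∉ t) :
    List.takeWhile (fun c => !(c == '.')) (t ++ '.' :: r) = t := by
  induction t with
  | nil => simp
  | cons a t ih =>
    have ha : (a == '.') = false := beq_eq_false_iff_ne.mpr (fun h => ht (by simp [h]))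
    simp only [List.cons_append, List.takeWhile_cons, ha]
    simp [ih (fun hm => ht (List.mem_cons_of_mem _ hm))]

theorem pvSW (key t : List Char) (ht : '.' ∉ t) :
    PySem.Chars.startswith key (t ++ ['.']) = true ↔
      ('.' ∈ key ∧ key.takeWhile (fun c => !(c == '.')) = t) := by
  rw [PySem.Chars.startswith_iff]
  constructor
  · rintro ⟨r, hr⟩
    subst hr
    constructor
    · simp
    · rw [List.append_assoc]
      exact pvTW t r ht
  · rintro ⟨hd, htw⟩
    have hsplit := List.takeWhile_append_dropWhile (p := fun c => !(c == '.')) (l := key)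
    have hne : List.dropWhile (fun c => !(c == '.')) key ≠ [] := by
      intro hnil
      rw [← hsplit, hnil, List.append_nil, htw] at hd
      exact ht hd
    obtain ⟨a, l', he⟩ := List.exists_cons_of_ne_nil hne
    have hhead := List.head_dropWhile_not (p := fun c => !(c == '.')) (l := key) hne
    simp only [he, List.head_cons] at hhead
    simp at hhead
    refine ⟨l', ?_⟩
    rw [← hsplit, htw, he, hhead]
    simp

theorem pvOfList_eq_iff (t : List Char) (s : String) : (String.ofList t = s) ↔ t = s.toList := by
  constructor
  · intro h; have := congrArg String.toList h; simpa using this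
  · intro h; subst h; simp [String.ofList]

theorem pvCat_eq (key : String) :
    (if PySem.Str.startswith key "chapter_group." then "chapter_group"
     else if PySem.Str.startswith key "reward_table." then "reward_table"
     else if PySem.Str.startswith key "chapter." then "chapter"
     else if PySem.Str.startswith key "reward." then "reward"
     else if PySem.Str.startswith key "quest." then "quest"
     else if PySem.Str.startswith key "task." then "task"
     else if PySem.Str.startswith key "file." then "file"
     else "other") = pvCatB key := by
  have hb : ∀ tok : List Char, '.' ∉ tok →
      PySem.Chars.startswith key.toList (tok ++ ['.'])
        = ('.' ∈ key.toList ∧ key.toList.takeWhile (fun c => !(c == '.')) = tok : Bool) := by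
    intro tok htok
    by_cases hc : ('.' ∈ key.toList ∧ key.toList.takeWhile (fun c => !(c == '.')) = tok)
    · simp [hc, (pvSW key.toList tok htok).mpr hc]
    · simp only [hc, decide_false]
      exact Bool.not_eq_true _ |>.mp (fun h => hc ((pvSW key.toList tok htok).mp h))
  simp only [PySem.Str.startswith_eq]
  simp only [show ("chapter_group." : String).toList = "chapter_group".toList ++ ['.'] from rfl,
      show ("reward_table." : String).toList = "reward_table".toList ++ ['.'] from rfl,
      show ("chapter." : String).toList = "chapter".toList ++ ['.'] from rfl,
      show ("reward." : String).toList = "reward".toList ++ ['.'] from rfl,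
      show ("quest." : String).toList = "quest".toList ++ ['.'] from rfl,
      show ("task." : String).toList = "task".toList ++ ['.'] from rfl,
      show ("file." : String).toList = "file".toList ++ ['.'] from rfl]
  simp only [hb _ (by decide : '.' ∉ ("chapter_group" : String).toList),
      hb _ (by decide : '.' ∉ ("reward_table" : String).toList),
      hb _ (by decide : '.' ∉ ("chapter" : String).toList),
      hb _ (by decide : '.' ∉ ("reward" : String).toList),
      hb _ (by decide : '.' ∉ ("quest" : String).toList),
      hb _ (by decide : '.' ∉ ("task" : String).toList),
      hb _ (by decide : '.' ∉ ("file" : String).toList)]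
  unfold pvCatB
  have hm : PySem.Str.splitMax? key "." 1
      = some (List.map String.ofList (PySem.Chars.splitOnMax key.toList ['.'] 1)) := by
    simp [PySem.Str.splitMax?, PySem.Chars.splitMax?]
  rw [hm, pvSplit key.toList]
  by_cases hd : '.' ∈ key.toList
  · rw [if_pos hd]
    simp only [List.map]
    by_cases h1 : key.toList.takeWhile (fun c => !(c == '.')) = ['c','h','a','p','t','e','r','_','g','r','o','u','p']
    · simp [hd, h1, pvKnownPrefixesB, PySem.Set.ofList]
    ·
      by_cases h2 : key.toList.takeWhile (fun c => !(c == '.')) = ['r','e','w','a','r','d','_','t','a','b','l','e']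
      · simp [hd, h2, pvKnownPrefixesB, PySem.Set.ofList]
      ·
        by_cases h3 : key.toList.takeWhile (fun c => !(c == '.')) = ['c','h','a','p','t','e','r']
        · simp [hd, h3, pvKnownPrefixesB, PySem.Set.ofList]
        ·
          by_cases h4 : key.toList.takeWhile (fun c => !(c == '.')) = ['q','u','e','s','t']
          · simp [hd, h4, pvKnownPrefixesB, PySem.Set.ofList]
          ·
            by_cases h5 : key.toList.takeWhile (fun c => !(c == '.')) = ['t','a','s','k']
            · simp [hd, h5, pvKnownPrefixesB, PySem.Set.ofList]
            ·
              by_cases h6 : key.toList.takeWhile (fun c => !(c == '.')) = ['r','e','w','a','r','d']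
              · simp [hd, h6, pvKnownPrefixesB, PySem.Set.ofList]
              ·
                by_cases h7 : key.toList.takeWhile (fun c => !(c == '.')) = ['f','i','l','e']
                · simp [hd, h7, pvKnownPrefixesB, PySem.Set.ofList]
                · simp [hd, h1, h2, h3, h4, h5, h6, h7, pvKnownPrefixesB, PySem.Set.ofList, pvOfList_eq_iff]
  · rw [if_neg hd]
    simp only [List.map]
    simp [hd]

theorem pvStep_eq (key value : String) (cats : PySem.Dict String (PySem.Dict String String)) :
    pvAssignA key value cats
        (PySem.List.sorted pvPrefixMapA.keys (fun p => PySem.Str.len p) true) =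
      cats.modify (pvCatB key) PySem.Dict.empty (fun inner => inner.insert key value) := by
  rw [show PySem.List.sorted pvPrefixMapA.keys (fun p => PySem.Str.len p) true
      = ["chapter_group.", "reward_table.", "chapter.", "reward.", "quest.", "task.", "file."] from rfl]
  rw [← pvCat_eq key]
  simp only [pvAssignA]
  split_ifs <;> rfl

-- ===== VERDICT (by name: the statement is the Claim_ definition above) =====
theorem categorize_entries_py_spec : Claim_equal_categorize_entries_py := by
  intro lang_data _
  unfold Spec_categorize_entries_py
  simp only [categorize_entries_py, categorize_entries_py_alt]
  have hf : (fun (cats : PySem.Dict String (PySem.Dict String String)) (kv : String × String) =>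
      pvAssignA kv.1 kv.2 cats
        (PySem.List.sorted pvPrefixMapA.keys (fun p => PySem.Str.len p) true)) =
      (fun cats kv => cats.modify (pvCatB kv.1) PySem.Dict.empty
        (fun inner => inner.insert kv.1 kv.2)) := by
    funext cats kv
    exact pvStep_eq kv.1 kv.2 cats
  rw [hf]
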